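-- pv_equiv track=rewrite | github.com/AI-replica/filenames_sanitizer | utils/languages.py | find_non_digit_between_digits
-- ===== SOURCE A (Python) =====
-- def find_non_digit_between_digits(text):
--     """
--     >>> find_non_digit_between_digits("Screenshot 2024-07-06 at 20.56.55 dog")
--     ['-', '-', ' at ', '.', '.']
--     >>> find_non_digit_between_digits("123abc456def789")
--     ['abc', 'def']
--     >>> find_non_digit_between_digits("No digits here!")
--     []
--     >>> find_non_digit_between_digits("1a2b3c4")
--     ['a', 'b', 'c']
--     >>> find_non_digit_between_digits("1  2")
--     ['  ']
--     >>> find_non_digit_between_digits("12345")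
--     []
--     >>> find_non_digit_between_digits("")
--     []
--     >>> find_non_digit_between_digits("abc123")
--     []
--     >>> find_non_digit_between_digits("123abc")
--     []
--     >>> find_non_digit_between_digits("1a2b3c")
--     ['a', 'b']
--     >>> find_non_digit_between_digits("1.2,3")
--     ['.', ',']
--     >>> find_non_digit_between_digits("1abc2def3")
--     ['abc', 'def']
--     >>> find_non_digit_between_digits("12345_6789")
--     ['_']
--     >>> find_non_digit_between_digits("7abc7")
--     ['abc']
--     """
--     result = []
--     current_substring = ""
--     between_digits7 = False
--     # last_was_digit7 = False
--
--     for char in text: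
--         if char.isdigit():
--             if between_digits7 and current_substring:
--                 result.append(current_substring)
--                 current_substring = ""
--             between_digits7 = True
--             # last_was_digit7 = True
--         elif between_digits7:
--             current_substring += char
--             # last_was_digit7 = False
--         else:
--             # last_was_digit7 = False
--             pass
--
--     # Don't add the last substring if it's not followed by a digit
--     # if between_digits7 and current_substring and last_was_digit7:
--     #    result.append(current_substring)
--
--     return result
-- ===== SOURCE B (Python) =====
-- def find_non_digit_between_digits(text):
--     idxs = [i for i, ch in enumerate(text) if ch.isdigit()]
--     segs = [text[p + 1:q] for p, q in zip(idxs, idxs[1:])]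
--     return [s for s in segs if s]
-- ===== Notes on version B (the rewrite author's own statement) =====
-- stated objective: alternative
-- what changed: B replaces A's accumulating state-machine scan (between-digits flag + growing current substring) by first building the list of digit positions and then slicing the text between consecutive positions, keeping the non-empty slices.
import Mathlib
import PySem

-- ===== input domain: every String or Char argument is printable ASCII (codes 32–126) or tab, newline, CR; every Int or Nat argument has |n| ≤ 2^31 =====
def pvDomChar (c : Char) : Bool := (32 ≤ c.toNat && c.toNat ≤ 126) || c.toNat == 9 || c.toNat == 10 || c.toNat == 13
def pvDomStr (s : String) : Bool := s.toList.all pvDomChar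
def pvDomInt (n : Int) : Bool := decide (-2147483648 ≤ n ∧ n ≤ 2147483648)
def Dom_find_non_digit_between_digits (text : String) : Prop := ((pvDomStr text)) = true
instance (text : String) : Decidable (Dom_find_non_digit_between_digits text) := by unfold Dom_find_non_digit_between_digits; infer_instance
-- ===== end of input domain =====

-- B replaces A's accumulating state-machine scan by collecting the digit positions first and
-- slicing the text between consecutive positions; same O(n) cost, different structure ("alternative").

-- ===== PORT A =====
-- one iteration of A's for-loop; the state is (result, current_substring, between_digits7),
-- strings carried as List Char (PySem convention) and converted by String.ofList on return
def pvAStep (st : List (List Char) × List Char × Bool) (c : Char) :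
    List (List Char) × List Char × Bool :=
  if PySem.Chars.isdigit c then
    (if st.2.2 && !st.2.1.isEmpty then (st.1 ++ [st.2.1], [], true) else (st.1, st.2.1, true))
  else if st.2.2 then (st.1, st.2.1 ++ [c], st.2.2) else st

def find_non_digit_between_digits (text : String) : List String :=
  ((text.toList.foldl pvAStep ([], [], false)).1).map (fun cs => String.ofList cs)

-- ===== PORT B =====
-- idxs = [i for i, ch in enumerate(text) if ch.isdigit()]
-- segs = [text[p+1:q] for p, q in zip(idxs, idxs[1:])]   (text[p+1:q] = PySem.List.slice, exact)
-- return [s for s in segs if s]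
def find_non_digit_between_digits_alt (text : String) : List String :=
  let cs := text.toList
  let idxs : List Int := (PySem.List.enumerate cs 0).filterMap
    (fun p => if PySem.Chars.isdigit p.2 then some p.1 else none)
  let segs : List (List Char) := (idxs.zip idxs.tail).map
    (fun p => PySem.List.slice cs (some (p.1 + 1)) (some p.2))
  (segs.filter (fun s => !s.isEmpty)).map (fun s => String.ofList s)

-- ===== PRECONDITION & SPEC =====
def Spec_find_non_digit_between_digits (text : String) (out : List String) : Prop := out = find_non_digit_between_digits_alt text
instance (text : String) (out : List String) : Decidable (Spec_find_non_digit_between_digits text out) := by unfold Spec_find_non_digit_between_digits; infer_instance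

-- ===== CLAIM (what is proved, stated in full; the proofs are below) =====
def Claim_equal_find_non_digit_between_digits : Prop := ∀ (text : String), Dom_find_non_digit_between_digits text → Spec_find_non_digit_between_digits text (find_non_digit_between_digits text)

-- ===== LEMMAS AND PROOFS =====

-- proof-side vocabulary (Nat indices)
def pvSeg (cs : List Char) (p q : Nat) : List Char := (cs.drop (p + 1)).take (q - (p + 1))

def pvOut (cs : List Char) : List Nat → List (List Char)
  | a :: b :: l => (if (pvSeg cs a b).isEmpty then [] else [pvSeg cs a b]) ++ pvOut cs (b :: l)
  | _ => []

def pvIdxsN : List Char → List Nat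
  | [] => []
  | c :: cs => (if PySem.Chars.isdigit c then [0] else []) ++ (pvIdxsN cs).map (· + 1)

def pvH : List Char → List Char → List (List Char)
  | _, [] => []
  | cur, c :: cs =>
    if PySem.Chars.isdigit c then (if cur.isEmpty then [] else [cur]) ++ pvH [] cs
    else pvH (cur ++ [c]) cs

def pvF0 : List Char → List (List Char)
  | [] => []
  | c :: cs => if PySem.Chars.isdigit c then pvH [] cs else pvF0 cs

-- ---- A-side: the fold is pvH / pvF0 ----
theorem pvA_loop_true (cs : List Char) : ∀ (r : List (List Char)) (u : List Char),
    (cs.foldl pvAStep (r, u, true)).1 = r ++ pvH u cs := by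
  induction cs with
  | nil => intro r u; simp [pvH]
  | cons c cs ih =>
    intro r u
    by_cases hc : PySem.Chars.isdigit c
    · by_cases hu : u.isEmpty
      · have hu' : u = [] := List.isEmpty_iff.mp hu
        simp [List.foldl_cons, pvAStep, hc, hu', pvH, ih]
      · simp [List.foldl_cons, pvAStep, hc, hu, pvH, ih]
    · simp [List.foldl_cons, pvAStep, hc, pvH, ih]

theorem pvA_loop_false (cs : List Char) : ∀ (r : List (List Char)),
    (cs.foldl pvAStep (r, [], false)).1 = r ++ pvF0 cs := by
  induction cs with
  | nil => intro r; simp [pvF0]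
  | cons c cs ih =>
    intro r
    by_cases hc : PySem.Chars.isdigit c
    · simp [List.foldl_cons, pvAStep, hc, pvF0, pvA_loop_true]
    · simp [List.foldl_cons, pvAStep, hc, pvF0, ih]

theorem pvA_eq (text : String) :
    find_non_digit_between_digits text = (pvF0 text.toList).map (fun cs => String.ofList cs) := by
  simp [find_non_digit_between_digits, pvA_loop_false]

-- ---- B-side bridges: the port computes pvOut over pvIdxsN ----
theorem pvIdx_bridge (cs : List Char) : ∀ (n : Nat),
    (PySem.List.enumerate cs (n : Int)).filterMap
      (fun p => if PySem.Chars.isdigit p.2 then some p.1 else none)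
    = (pvIdxsN cs).map (fun k => ((k + n : Nat) : Int)) := by
  induction cs with
  | nil => intro n; simp [PySem.List.enumerate_nil, pvIdxsN]
  | cons c cs ih =>
    intro n
    have hcast : (n : Int) + 1 = ((n + 1 : Nat) : Int) := by push_cast; ring
    have hmm : ((pvIdxsN cs).map (· + 1)).map (fun k : Nat => ((k + n : Nat) : Int))
        = (pvIdxsN cs).map (fun k : Nat => ((k + (n + 1) : Nat) : Int)) := by
      rw [List.map_map]
      apply List.map_congr_left; intro k _
      simp only [Function.comp_apply]; congr 1; omega
    rw [PySem.List.enumerate_cons, List.filterMap_cons, hcast]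
    by_cases hc : PySem.Chars.isdigit c
    · simp only [hc, if_true, ih (n + 1), pvIdxsN, List.cons_append, List.nil_append,
        List.map_cons, hmm, Nat.zero_add]
    · simp only [hc, ih (n + 1), pvIdxsN, List.nil_append, hmm, Bool.false_eq_true,
        if_false]

theorem pvZip_bridge (cs : List Char) : ∀ (l : List Nat),
    (((l.map (fun k : Nat => (k : Int))).zip (l.map (fun k : Nat => (k : Int))).tail).map
        (fun p => PySem.List.slice cs (some (p.1 + 1)) (some p.2))).filter
      (fun s => !s.isEmpty) = pvOut cs l
  | [] => by simp [pvOut]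
  | [a] => by simp [pvOut]
  | a :: b :: l => by
    have ih := pvZip_bridge cs (b :: l)
    have hseg : PySem.List.slice cs (some ((a : Int) + 1)) (some (b : Int)) = pvSeg cs a b := by
      have : (a : Int) + 1 = ((a + 1 : Nat) : Int) := by push_cast; ring
      rw [this, PySem.List.slice_natCast]; rfl
    simp only [List.map_cons, List.tail_cons, List.zip_cons_cons, List.filter_cons, hseg] at ih ⊢
    by_cases he : (pvSeg cs a b).isEmpty <;> simp [he, pvOut, ih]

theorem pvB_eq (text : String) :
    find_non_digit_between_digits_alt text
      = (pvOut text.toList (pvIdxsN text.toList)).map (fun cs => String.ofList cs) := by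
  simp only [find_non_digit_between_digits_alt]
  rw [show ((0 : Int)) = ((0 : Nat) : Int) by norm_num, pvIdx_bridge text.toList 0]
  simp only [Nat.add_zero]
  rw [pvZip_bridge]

-- ---- the common value: pvF0 = pvOut ∘ pvIdxsN ----
theorem pvNoDigit_idx : ∀ (pre : List Char), (∀ x ∈ pre, PySem.Chars.isdigit x = false) →
    pvIdxsN pre = [] := by
  intro pre
  induction pre with
  | nil => intro _; rfl
  | cons c pre ih =>
    intro h
    simp [pvIdxsN, h c (by simp), ih (fun x hx => h x (by simp [hx]))]

theorem pvPreIdx : ∀ (pre v : List Char), (∀ x ∈ pre, PySem.Chars.isdigit x = false) →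
    pvIdxsN (pre ++ v) = (pvIdxsN v).map (· + pre.length) := by
  intro pre
  induction pre with
  | nil => intro v _; simp
  | cons c pre ih =>
    intro v h
    simp only [List.cons_append, pvIdxsN, h c (by simp), Bool.false_eq_true,
      ih v (fun x hx => h x (by simp [hx])), List.map_map]
    apply List.map_congr_left; intro k _
    simp only [Function.comp, List.length_cons]; omega

theorem pvShift (w cs : List Char) : ∀ (l : List Nat),
    pvOut (w ++ cs) (l.map (· + w.length)) = pvOut cs l
  | [] => by simp [pvOut]
  | [a] => by simp [pvOut]
  | a :: b :: l => by
    have ih := pvShift w cs (b :: l)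
    have hseg : pvSeg (w ++ cs) (a + w.length) (b + w.length) = pvSeg cs a b := by
      simp only [pvSeg]
      have h1 : a + w.length + 1 = w.length + (a + 1) := by omega
      have h2 : b + w.length - (a + w.length + 1) = b - (a + 1) := by omega
      rw [h2, h1]; simp
    simp only [List.map_cons, pvOut, hseg] at ih ⊢
    rw [ih]

theorem pvG (n : Nat) : ∀ (u pre : List Char) (c : Char), u.length ≤ n →
    (∀ x ∈ pre, PySem.Chars.isdigit x = false) → PySem.Chars.isdigit c = true →
    pvOut (c :: (pre ++ u)) (pvIdxsN (c :: (pre ++ u))) = pvH pre u := by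
  induction n with
  | zero =>
    intro u pre c hlen hpre hc
    have hu : u = [] := List.eq_nil_of_length_eq_zero (Nat.le_zero.mp hlen)
    subst hu
    simp [pvIdxsN, hc, pvNoDigit_idx pre hpre, pvOut, pvH]
  | succ n ih =>
    intro u pre c hlen hpre hc
    match u with
    | [] => simp [pvIdxsN, hc, pvNoDigit_idx pre hpre, pvOut, pvH]
    | y :: u' =>
      by_cases hy : PySem.Chars.isdigit y
      · -- digit after the gap: one segment (pre) is emitted, then recurse on u'
        have h3 : pvIdxsN (y :: u') = 0 :: (pvIdxsN u').map (· + 1) := by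
          simp [pvIdxsN, hy]
        have h2 : pvIdxsN (pre ++ y :: u')
            = pre.length :: (pvIdxsN u').map (· + (pre.length + 1)) := by
          rw [pvPreIdx pre (y :: u') hpre, h3]
          simp only [List.map_cons, List.map_map, Nat.zero_add]
          congr 1
          apply List.map_congr_left; intro k _
          simp only [Function.comp_apply]; omega
        have hidx : pvIdxsN (c :: (pre ++ y :: u'))
            = 0 :: (pre.length + 1) :: (pvIdxsN u').map (· + (pre.length + 2)) := by
          have h1 : pvIdxsN (c :: (pre ++ y :: u'))
              = [0] ++ (pvIdxsN (pre ++ y :: u')).map (· + 1) := by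
            simp [pvIdxsN, hc]
          have hcomp : ((pvIdxsN u').map (· + (pre.length + 1))).map (· + 1)
              = (pvIdxsN u').map (· + (pre.length + 2)) := by
            rw [List.map_map]
            apply List.map_congr_left; intro k _
            simp only [Function.comp_apply]; omega
          rw [h1, h2, List.map_cons, hcomp]
          rfl
        have hseg0 : pvSeg (c :: (pre ++ y :: u')) 0 (pre.length + 1) = pre := by
          simp [pvSeg]
        have htail : pvOut (c :: (pre ++ y :: u'))
              ((pre.length + 1) :: (pvIdxsN u').map (· + (pre.length + 2))) = pvH [] u' := by
          have hlist : c :: (pre ++ y :: u') = (c :: pre) ++ (y :: u') := by simp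
          have hmap : ((pre.length + 1) :: (pvIdxsN u').map (· + (pre.length + 2)))
              = (pvIdxsN (y :: u')).map (· + (c :: pre).length) := by
            simp only [pvIdxsN, hy, if_true, List.singleton_append, List.map_cons,
              List.map_map, List.length_cons]
            congr 1
            · simp
            · apply List.map_congr_left; intro k _
              simp only [Function.comp_apply]; omega
          rw [hlist, hmap, pvShift]
          exact ih u' [] y (by rw [List.length_cons] at hlen; omega) (by simp) hy
        rw [hidx]
        show (if (pvSeg (c :: (pre ++ y :: u')) 0 (pre.length + 1)).isEmpty then []
            else [pvSeg (c :: (pre ++ y :: u')) 0 (pre.length + 1)]) ++ _ = _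
        rw [hseg0, htail]
        simp [pvH, hy]
      · -- non-digit: it joins the gap (pre grows by y)
        have hlist : c :: (pre ++ y :: u') = c :: ((pre ++ [y]) ++ u') := by simp
        rw [hlist, ih u' (pre ++ [y]) c (by rw [List.length_cons] at hlen; omega)
          (by intro x hx; rcases List.mem_append.mp hx with h | h
              · exact hpre x h
              · simp at h; subst h; simpa using hy) hc]
        simp [pvH, hy]

theorem pvMain : ∀ (cs : List Char), pvF0 cs = pvOut cs (pvIdxsN cs) := by
  intro cs
  induction cs with
  | nil => simp [pvF0, pvIdxsN, pvOut]
  | cons c cs ih =>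
    by_cases hc : PySem.Chars.isdigit c
    · have := pvG cs.length cs [] c (le_refl _) (by simp) hc
      simpa [pvF0, hc] using this.symm
    · have hidx : pvIdxsN (c :: cs) = (pvIdxsN cs).map (· + [c].length) := by
        simp [pvIdxsN, hc]
      have : pvOut ([c] ++ cs) ((pvIdxsN cs).map (· + [c].length)) = pvOut cs (pvIdxsN cs) :=
        pvShift [c] cs (pvIdxsN cs)
      simp only [List.singleton_append] at this
      rw [pvF0, if_neg (by simp [hc]), ih, hidx, this]

-- ===== VERDICT (by name: the statement is the Claim_ definition above) =====
theorem find_non_digit_between_digits_spec : Claim_equal_find_non_digit_between_digits := by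
  intro text _
  unfold Spec_find_non_digit_between_digits
  rw [pvA_eq, pvB_eq, pvMain]
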